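-- pv_equiv track=rewrite | github.com/rishitkhare/Tetris | Tetris.py | rotate_vector
-- ===== SOURCE A (Python) =====
-- ROT_90_TRANS = [[0, 1],
--                 [-1, 0]]
--
-- def rotate_vector(vec : tuple, iterations : int) -> tuple:
--     while iterations < 0:
--         iterations += 4
--
--     for i in range(0, iterations):
--         vec = (
--                 (ROT_90_TRANS[0][0] * vec[0]) + (ROT_90_TRANS[0][1] * vec[1]),
--                 (ROT_90_TRANS[1][0] * vec[0]) + (ROT_90_TRANS[1][1] * vec[1])
--                )
--
--     return vec
-- ===== SOURCE B (Python) =====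
-- def rotate_vector(vec, iterations):
--     k = iterations % 4
--     if k == 0:
--         return vec
--     x, y = vec[0], vec[1]
--     return ((y, -x), (-x, -y), (-y, x))[k - 1]
-- ===== Notes on version B (the rewrite author's own statement) =====
-- stated objective: simpler
-- what changed: B reduces iterations mod 4 and reads the answer off a 3-entry rotation table instead of looping once per requested rotation.
-- intended difference: When iterations is a positive multiple of 4 and the vector does not have exactly 2 components, A still runs the loop and truncates the input to the rotated first-two-component pair, while B returns the vector unchanged; a rotation by a multiple of 360 degrees is intended to be the identity. — e.g. on rotate_vector([1, 2, 3], 4): A returns [1, 2], B returns [1, 2, 3]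
import Mathlib
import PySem

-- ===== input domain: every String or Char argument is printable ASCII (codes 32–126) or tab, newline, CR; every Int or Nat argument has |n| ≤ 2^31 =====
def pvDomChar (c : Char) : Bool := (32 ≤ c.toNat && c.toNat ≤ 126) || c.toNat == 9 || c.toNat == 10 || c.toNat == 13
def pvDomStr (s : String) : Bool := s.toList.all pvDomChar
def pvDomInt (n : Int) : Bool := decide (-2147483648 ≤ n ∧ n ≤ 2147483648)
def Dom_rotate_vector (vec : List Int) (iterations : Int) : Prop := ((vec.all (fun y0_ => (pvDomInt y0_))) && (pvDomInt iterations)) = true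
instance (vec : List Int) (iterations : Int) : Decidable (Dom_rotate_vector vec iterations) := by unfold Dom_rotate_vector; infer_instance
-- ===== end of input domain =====

-- B replaces A's once-per-rotation loop by iterations mod 4 and a 3-entry rotation table.
-- Pre_ excludes inputs where A raises IndexError (fewer than 2 components with at least one loop iteration).


-- ===== PORT A =====
def ROT_90_TRANS : List (List Int) := [[0, 1], [-1, 0]]

-- while iterations < 0: iterations += 4
def rotNorm (n : Int) : Int :=
  if _h : n < 0 then rotNorm (n + 4) else n
termination_by (-n).toNat
decreasing_by omega

def rotate_vector (vec : List Int) (iterations : Int) : List Int :=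
  let iterations := rotNorm iterations
  (PySem.List.pyRange 0 iterations 1).foldl
    (fun vec _i =>
      [ (PySem.List.pyGetD (PySem.List.pyGetD ROT_90_TRANS 0 []) 0 0) * (PySem.List.pyGetD vec 0 0)
          + (PySem.List.pyGetD (PySem.List.pyGetD ROT_90_TRANS 0 []) 1 0) * (PySem.List.pyGetD vec 1 0),
        (PySem.List.pyGetD (PySem.List.pyGetD ROT_90_TRANS 1 []) 0 0) * (PySem.List.pyGetD vec 0 0)
          + (PySem.List.pyGetD (PySem.List.pyGetD ROT_90_TRANS 1 []) 1 0) * (PySem.List.pyGetD vec 1 0) ])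
    vec

-- ===== PORT B =====
def rotate_vector_alt (vec : List Int) (iterations : Int) : List Int :=
  let k := PySem.Int.mod iterations 4
  if k = 0 then vec
  else
    let x := PySem.List.pyGetD vec 0 0
    let y := PySem.List.pyGetD vec 1 0
    PySem.List.pyGetD [[y, -x], [-x, -y], [-y, x]] (k - 1) []

-- ===== PRECONDITION & SPEC =====
-- Pre_ excludes exactly the inputs where A raises IndexError: fewer than 2 components
-- while the loop body runs at least once.
def Pre_rotate_vector (vec : List Int) (iterations : Int) : Prop :=
  2 ≤ vec.length ∨ (iterations ≤ 0 ∧ iterations % 4 = 0)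
instance (vec : List Int) (iterations : Int) : Decidable (Pre_rotate_vector vec iterations) := by
  unfold Pre_rotate_vector; infer_instance

def pvWitness_rotate_vector : List Int × Int := ([1, 2], 1)

-- When iterations is a positive multiple of 4 and the vector does not have exactly 2 components,
-- A truncates the input to the rotated first-two-component pair, while B returns the vector
-- unchanged; a rotation by a multiple of 360 degrees is intended to be the identity.
def D_rotate_vector (vec : List Int) (iterations : Int) : Prop :=
  vec.length ≠ 2 ∧ 0 < iterations ∧ iterations % 4 = 0
instance (vec : List Int) (iterations : Int) : Decidable (D_rotate_vector vec iterations) := by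
  unfold D_rotate_vector; infer_instance

def Spec_rotate_vector (vec : List Int) (iterations : Int) (out : List Int) : Prop :=
  ¬ D_rotate_vector vec iterations → out = rotate_vector_alt vec iterations
instance (vec : List Int) (iterations : Int) (out : List Int) : Decidable (Spec_rotate_vector vec iterations out) := by
  unfold Spec_rotate_vector; infer_instance

def pvDiffWitness_rotate_vector : List Int × Int := ([1, 2, 3], 4)
def pvDiffWitnessOut_rotate_vector : (List Int) × (List Int) := ([1, 2], [1, 2, 3])

-- ===== CLAIM =====
def Claim_unchanged_rotate_vector : Prop := ∀ (vec : List Int) (iterations : Int), Dom_rotate_vector vec iterations → Pre_rotate_vector vec iterations → Spec_rotate_vector vec iterations (rotate_vector vec iterations)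
def Claim_changed_rotate_vector : Prop := Dom_rotate_vector (pvDiffWitness_rotate_vector.1) (pvDiffWitness_rotate_vector.2) ∧ Pre_rotate_vector (pvDiffWitness_rotate_vector.1) (pvDiffWitness_rotate_vector.2) ∧ D_rotate_vector (pvDiffWitness_rotate_vector.1) (pvDiffWitness_rotate_vector.2) ∧ rotate_vector (pvDiffWitness_rotate_vector.1) (pvDiffWitness_rotate_vector.2) = pvDiffWitnessOut_rotate_vector.1 ∧ rotate_vector_alt (pvDiffWitness_rotate_vector.1) (pvDiffWitness_rotate_vector.2) = pvDiffWitnessOut_rotate_vector.2 ∧ pvDiffWitnessOut_rotate_vector.1 ≠ pvDiffWitnessOut_rotate_vector.2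
def Claim_exact_rotate_vector : Prop := ∀ (vec : List Int) (iterations : Int), Dom_rotate_vector vec iterations → Pre_rotate_vector vec iterations → D_rotate_vector vec iterations → rotate_vector vec iterations ≠ rotate_vector_alt vec iterations

-- ===== LEMMAS AND PROOFS =====

-- A's while-loop: identity on nonnegatives, Python-style mod 4 on negatives.
theorem rotNorm_eq (n : Int) : rotNorm n = if n < 0 then n % 4 else n := by
  by_cases h : n < 0
  · simp only [if_pos h]
    have : ∀ m : Nat, ∀ n : Int, (-n).toNat = m → n < 0 → rotNorm n = n % 4 := by
      intro m
      induction m using Nat.strong_induction_on with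
      | _ m ih =>
        intro n hm hn
        rw [rotNorm, dif_pos hn]
        by_cases h4 : n + 4 < 0
        · rw [ih ((-(n+4)).toNat) (by omega) (n+4) rfl h4]; omega
        · rw [rotNorm, dif_neg h4]; omega
    exact this _ n rfl h
  · simp only [if_neg h]
    rw [rotNorm, dif_neg h]

def rotStep (v : List Int) : List Int :=
  [ (PySem.List.pyGetD (PySem.List.pyGetD ROT_90_TRANS 0 []) 0 0) * (PySem.List.pyGetD v 0 0)
      + (PySem.List.pyGetD (PySem.List.pyGetD ROT_90_TRANS 0 []) 1 0) * (PySem.List.pyGetD v 1 0),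
    (PySem.List.pyGetD (PySem.List.pyGetD ROT_90_TRANS 1 []) 0 0) * (PySem.List.pyGetD v 0 0)
      + (PySem.List.pyGetD (PySem.List.pyGetD ROT_90_TRANS 1 []) 1 0) * (PySem.List.pyGetD v 1 0) ]

theorem rotStep_pair (x y : Int) : rotStep (x :: y :: []) = [y, -x] := by
  simp [rotStep, ROT_90_TRANS, PySem.List.pyGetD]

theorem rotStep_cons (x y : Int) (t : List Int) : rotStep (x :: y :: t) = [y, -x] := by
  simp [rotStep, ROT_90_TRANS, PySem.List.pyGetD]

theorem foldl_const_iterate (step : List Int → List Int) :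
    ∀ (l : List Int) (v : List Int),
      List.foldl (fun v (_ : Int) => step v) v l = step^[l.length] v := by
  intro l
  induction l with
  | nil => intro v; simp
  | cons a t ih => intro v; simp [List.foldl, ih, Function.iterate_succ_apply]

theorem rotate_vector_eq_iterate (vec : List Int) (iterations : Int) :
    rotate_vector vec iterations = rotStep^[(PySem.List.pyRange 0 (rotNorm iterations) 1).length] vec := by
  simp only [rotate_vector]
  exact foldl_const_iterate rotStep _ vec

-- the 4-cycle of rotStep on pairs
theorem iterate_rotStep_pair :
    ∀ (m : Nat) (x y : Int),
      rotStep^[m] [x, y] = [[x, y], [y, -x], [-x, -y], [-y, x]].getD (m % 4) [] := by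
  intro m
  induction m using Nat.strong_induction_on with
  | _ m ih =>
    intro x y
    by_cases h4 : 4 ≤ m
    · have hm : m = (m - 4) + 4 := by omega
      rw [hm, Function.iterate_add_apply]
      have h4step : rotStep^[4] [x, y] = [x, y] := by
        simp [Function.iterate_succ_apply, rotStep_pair]
      rw [h4step, ih (m - 4) (by omega)]
      congr 1
      omega
    · interval_cases m <;> simp [Function.iterate_succ_apply, rotStep_pair]

theorem iterate_rotStep_long (m : Nat) (hm : 1 ≤ m) (x y : Int) (t : List Int) :
    rotStep^[m] (x :: y :: t) = rotStep^[m] [x, y] := by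
  obtain ⟨m', rfl⟩ : ∃ m', m = m' + 1 := ⟨m - 1, by omega⟩
  rw [Function.iterate_succ_apply, Function.iterate_succ_apply, rotStep_cons, rotStep_pair]

theorem two_le_exists (v : List Int) (h : 2 ≤ v.length) :
    ∃ x y t, v = x :: y :: t := by
  match v with
  | x :: y :: t => exact ⟨x, y, t, rfl⟩

theorem alt_mod (iterations : Int) : PySem.Int.mod iterations 4 = iterations % 4 :=
  PySem.Int.mod_eq_emod_of_pos (by omega)

-- main agreement lemma
theorem main_eq (vec : List Int) (iterations : Int)
    (hpre : Pre_rotate_vector vec iterations) (hnd : ¬ D_rotate_vector vec iterations) :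
    rotate_vector vec iterations = rotate_vector_alt vec iterations := by
  have hk := alt_mod iterations
  rw [rotate_vector_eq_iterate, PySem.List.length_pyRange_one]
  rw [rotNorm_eq]
  simp only [rotate_vector_alt, hk]
  set k : Int := iterations % 4 with hkdef
  by_cases hneg : iterations < 0
  · -- m = k ∈ [0,4)
    rw [if_pos hneg]
    have hk4 : 0 ≤ k ∧ k < 4 := by omega
    by_cases hk0 : k = 0
    · simp [hk0]
    · rw [if_neg hk0]
      obtain ⟨x, y, t, rfl⟩ := two_le_exists vec (by
        rcases hpre with h | h
        · exact h
        · omega)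
      have hmnat : (k - 0).toNat % 4 = k.toNat := by omega
      rw [iterate_rotStep_long _ (by omega) x y t, iterate_rotStep_pair, hmnat]
      simp only [PySem.List.pyGetD]
      have hp0 : (0:Int) ≤ (t.length : Int) + 1 := by positivity
      have : k = 1 ∨ k = 2 ∨ k = 3 := by omega
      rcases this with h | h | h <;> rw [h] <;> simp [PySem.List.pyGet?, PySem.List.pyIdx?, hp0]
  · rw [if_neg hneg]
    have h0 : 0 ≤ iterations := by omega
    have hmnat : (iterations - 0).toNat % 4 = k.toNat := by omega
    by_cases hk0 : k = 0
    · rw [if_pos hk0]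
      by_cases hz : iterations = 0
      · simp [hz]
      · -- positive multiple of 4; ¬D forces length = 2
        have hlen : vec.length = 2 := by
          by_contra hne
          exact hnd ⟨hne, by omega, hk0⟩
        obtain ⟨x, y, t, rfl⟩ := two_le_exists vec (by omega)
        have ht : t = [] := by
          simpa using hlen
        subst ht
        rw [iterate_rotStep_long _ (by omega) x y [], iterate_rotStep_pair, hmnat]
        simp [hk0]
    · rw [if_neg hk0]
      obtain ⟨x, y, t, rfl⟩ := two_le_exists vec (by
        rcases hpre with h | h
        · exact h
        · omega)
      rw [iterate_rotStep_long _ (by omega) x y t, iterate_rotStep_pair, hmnat]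
      simp only [PySem.List.pyGetD]
      have hp0 : (0:Int) ≤ (t.length : Int) + 1 := by positivity
      have : k = 1 ∨ k = 2 ∨ k = 3 := by omega
      rcases this with h | h | h <;> rw [h] <;> simp [PySem.List.pyGet?, PySem.List.pyIdx?, hp0]

-- ===== VERDICT =====
theorem rotate_vector_spec : Claim_unchanged_rotate_vector := by
  intro vec iterations _ hpre hnd
  exact main_eq vec iterations hpre hnd

theorem rotate_vector_changed : Claim_changed_rotate_vector := by
  unfold Claim_changed_rotate_vector
  refine ⟨by decide, by decide, by decide, ?_, by decide, by decide⟩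
  show rotate_vector [1, 2, 3] 4 = [1, 2]
  rw [rotate_vector_eq_iterate, rotNorm_eq, if_neg (by omega)]
  decide

theorem rotate_vector_tight : Claim_exact_rotate_vector := by
  intro vec iterations _ hpre hd
  obtain ⟨hlen, hpos, hmod⟩ := hd
  have h2 : 2 ≤ vec.length := by
    rcases hpre with h | h
    · exact h
    · omega
  obtain ⟨x, y, t, rfl⟩ := two_le_exists vec h2
  have hklen : 3 ≤ (x :: y :: t).length := by
    simp only [List.length_cons] at hlen ⊢; omega
  -- A returns a length-2 list
  have hA : (rotate_vector (x :: y :: t) iterations).length = 2 := by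
    rw [rotate_vector_eq_iterate, PySem.List.length_pyRange_one, rotNorm_eq, if_neg (by omega)]
    rw [iterate_rotStep_long _ (by omega) x y t, iterate_rotStep_pair]
    have : (iterations - 0).toNat % 4 = 0 := by omega
    rw [this]
    simp
  -- B returns vec unchanged
  have hB : rotate_vector_alt (x :: y :: t) iterations = x :: y :: t := by
    simp only [rotate_vector_alt, alt_mod]
    rw [if_pos (by omega)]
  intro heq
  rw [hB] at heq
  rw [heq] at hA
  simp only [List.length_cons] at hA hklen
  omega
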